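-- pv_equiv track=rewrite | github.com/S-vani/CSC108 | LABS/lab5.py | loopy_madness
-- ===== SOURCE A (Python) =====
-- def loopy_madness(string1: str, string2: str) -> str:
--     """
--     Given two strings <string1> and <string2>, return a new string that
--     contains letters from these two strings "interwoven" together, starting with
--     the first character of <string1>. If the two strings are not of equal
--     length, then start looping "backwards-and-forwards" in the shorter string
--     until you come to the end of the longer string.
--
--     "interwoven" (or "interweaving") means constructing a new string by taking
--     the first letter from the first string, adding the first letter of the
--     second string, adding the second letter of the first string,
--     adding the second letter of the second string, and so on.
--
--     "backwards-and-forwards" is a custom looping term. First the loop starts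
--     at position 1 (index 0) and goes until position n (i.e., the end). Once the
--     loop reaches position n, it goes backwards, starting at position n - 1 and
--     goes to position 1 (index 0). This repeats until the two strings are
--     interwoven. For example, the backwards-and-forwards operations of "abc"
--     would be "abcbabcba..."
--
--     Examples:
--         If you are given "abc" and "123", then the output string is "a1b2c3".
--         This is after taking "a" from the first string, adding "1" from the
--         second string, adding "b" from the first string, and so on.
--
--         Things get more interesting when you are given two strings that differ
--         in length. For example, if you are given "abcde" and "12", then the
--         output would be "a1b2c1d2e1". Notice how the shorter string loops
--         around when it runs out of characters, and continues looping until the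
--         longer string is exhausted.
--
--         Another example of the "backwards-and-forwards" implementation given
--         two strings of differing length: "abcdfe" and "123", then the output
--         would be "a1b2c3d2f1e2".
--
--         Note that the first string could be shorter too, for example, given
--         "ab" and "123", the output would be "a1b2a3".
--
--
--     Precondition: both input strings will NOT be empty.
--
--     Hint: a good sanity check is to ensure that your output string is exactly
--     twice the length of the longer input string :)
--     >>> loopy_madness("abc", "123")
--     'a1b2c3'
--
--     >>> loopy_madness("abcde", "12")
--     'a1b2c1d2e1'
--
--     >>> loopy_madness("ab", "123")
--     'a1b2a3'
--     """
--
--     len1 = len(string1)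
--     len2 = len(string2)
--     max_len = max(len1, len2)
--
--     new_string = ""
--
--     counter1 = 0
--     counter2 = 0
--     reversing1 = False
--     reversing2 = False
--
--     for _ in range(max_len):
--         new_string += string1[counter1]
--         if len1 > 1 and not reversing1:
--             counter1 += 1
--             if counter1 == len1:
--                 counter1 = len1 - 2
--                 reversing1 = True
--         elif len1 > 1 and reversing1:
--             counter1 -= 1
--             if counter1 < 0:
--                 counter1 = 1
--                 reversing1 = False
--
--         new_string += string2[counter2]
--         if len2 > 1 and not reversing2:
--             counter2 += 1
--             if counter2 == len2:
--                 counter2 = len2 - 2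
--                 reversing2 = True
--         elif len2 > 1 and reversing2:
--             counter2 -= 1
--             if counter2 < 0:
--                 counter2 = 1
--                 reversing2 = False
--
--     return new_string
-- ===== SOURCE B (Python) =====
-- def loopy_madness(string1: str, string2: str) -> str:
--     def idx(n: int, i: int) -> int:
--         if n == 1:
--             return 0
--         m = i % (2 * (n - 1))
--         return m if m < n else 2 * (n - 1) - m
--
--     n1 = len(string1)
--     n2 = len(string2)
--     out = []
--     for i in range(max(n1, n2)):
--         out.append(string1[idx(n1, i)])
--         out.append(string2[idx(n2, i)])
--     return ''.join(out)
-- ===== Notes on version B (the rewrite author's own statement) =====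
-- stated objective: simpler
-- what changed: Replaces the stateful forward/backward counter-and-flag state machine with a closed-form triangle-wave index i % (2*(n-1)) folded at the peak, collecting characters in a list joined once.
import Mathlib
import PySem

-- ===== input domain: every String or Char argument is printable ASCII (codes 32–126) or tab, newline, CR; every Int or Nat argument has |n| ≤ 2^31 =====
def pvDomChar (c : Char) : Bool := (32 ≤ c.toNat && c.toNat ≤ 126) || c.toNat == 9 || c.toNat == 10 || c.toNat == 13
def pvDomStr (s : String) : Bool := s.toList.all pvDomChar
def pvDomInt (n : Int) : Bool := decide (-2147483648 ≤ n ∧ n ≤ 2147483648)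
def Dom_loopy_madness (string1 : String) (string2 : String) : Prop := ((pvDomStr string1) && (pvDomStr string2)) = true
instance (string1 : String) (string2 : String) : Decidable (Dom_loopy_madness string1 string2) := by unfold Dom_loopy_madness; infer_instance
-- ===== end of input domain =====

-- B replaces A's forward/backward counter-and-flag state machine by a closed-form
-- triangle-wave index; objective: simpler.

-- ===== PORT A =====
-- one Python loop-body update of (counter, reversing) for one string of length `len`
def aStep (len : Int) (c : Int) (r : Bool) : Int × Bool :=
  if len > 1 ∧ r = false then
    let c := c + 1
    if c = len then (len - 2, true) else (c, false)
  else if len > 1 ∧ r = true then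
    let c := c - 1
    if c < 0 then (1, false) else (c, true)
  else (c, r)

-- the body of A's `for _ in range(max_len)` loop, over the state
-- (new_string, counter1, counter2, reversing1, reversing2)
-- `string[c]` is in range whenever the Python returns (Pre_ excludes the IndexError
-- inputs), so the `.getD ' '` default is never used on admitted inputs.
def aBody (string1 string2 : String) (len1 len2 : Int)
    (st : List Char × Int × Int × Bool × Bool) (_ : Nat) :
    List Char × Int × Int × Bool × Bool :=
  let (ns, c1, c2, r1, r2) := st
  let ns := ns ++ [(PySem.Str.pyGet? string1 c1).getD ' ']
  let (c1, r1) := aStep len1 c1 r1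
  let ns := ns ++ [(PySem.Str.pyGet? string2 c2).getD ' ']
  let (c2, r2) := aStep len2 c2 r2
  (ns, c1, c2, r1, r2)

def loopy_madness (string1 : String) (string2 : String) : String :=
  let len1 : Int := PySem.Str.len string1
  let len2 : Int := PySem.Str.len string2
  let max_len : Int := max len1 len2
  let st := (List.range max_len.toNat).foldl (aBody string1 string2 len1 len2)
    ([], 0, 0, false, false)
  String.ofList st.1

-- ===== PORT B =====
-- closed-form triangle-wave index: B's helper idx(n, i)
def triIdx (n : Int) (i : Int) : Int :=
  if n = 1 then 0
  else
    let m := PySem.Int.mod i (2 * (n - 1))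
    if m < n then m else 2 * (n - 1) - m

-- the body of B's `for i in range(max(n1, n2))` loop over the output list
def bBody (string1 string2 : String) (n1 n2 : Int) (out : List Char) (i : Nat) : List Char :=
  (out ++ [(PySem.Str.pyGet? string1 (triIdx n1 (i : Int))).getD ' '])
    ++ [(PySem.Str.pyGet? string2 (triIdx n2 (i : Int))).getD ' ']

def loopy_madness_alt (string1 : String) (string2 : String) : String :=
  let n1 : Int := PySem.Str.len string1
  let n2 : Int := PySem.Str.len string2
  let out := (List.range (max n1 n2).toNat).foldl (bBody string1 string2 n1 n2) []
  String.ofList out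

-- ===== PRECONDITION & SPEC =====
-- Pre_ excludes exactly the inputs where one string is empty and the other is not:
-- there both Pythons raise IndexError.
def Pre_loopy_madness (string1 : String) (string2 : String) : Prop :=
  (string1.toList = [] ↔ string2.toList = [])
instance (string1 : String) (string2 : String) : Decidable (Pre_loopy_madness string1 string2) := by
  unfold Pre_loopy_madness; infer_instance

def pvWitness_loopy_madness : String × String := ("abcde", "12")

def Spec_loopy_madness (string1 : String) (string2 : String) (out : String) : Prop := out = loopy_madness_alt string1 string2
instance (string1 : String) (string2 : String) (out : String) : Decidable (Spec_loopy_madness string1 string2 out) := by unfold Spec_loopy_madness; infer_instance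

-- ===== CLAIM (what is proved, stated in full; the proofs are below) =====
def Claim_equal_loopy_madness : Prop := ∀ (string1 : String) (string2 : String), Dom_loopy_madness string1 string2 → Pre_loopy_madness string1 string2 → Spec_loopy_madness string1 string2 (loopy_madness string1 string2)

-- ===== LEMMAS AND PROOFS =====

-- the reversing flag after k loop iterations, as a closed form
def rflag (nn : Nat) (k : Nat) : Bool :=
  decide (1 < nn ∧ 1 ≤ k ∧ nn - 1 ≤ (k - 1) % (2 * (nn - 1)))

-- the counter after k loop iterations: triangle-wave index as a Nat function
def natTri (nn : Nat) (k : Nat) : Nat :=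
  if nn ≤ 1 then 0
  else
    let m := k % (2 * (nn - 1))
    if m < nn then m else 2 * (nn - 1) - m

lemma triIdx_cast (nn : Nat) (k : Nat) (h : 1 ≤ nn) :
    triIdx (nn : Int) (k : Int) = (natTri nn k : Int) := by
  unfold triIdx natTri
  rcases Nat.lt_or_ge 1 nn with h2 | h2
  · have hne : (nn : Int) ≠ 1 := by omega
    obtain ⟨m, hmlt, hmeq⟩ : ∃ m, m < 2 * (nn - 1) ∧ k % (2 * (nn - 1)) = m :=
      ⟨_, Nat.mod_lt _ (by omega), rfl⟩
    have hcast : (2 * ((nn:Int) - 1)) = ((2 * (nn - 1) : Nat) : Int) := by push_cast; omega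
    have hmod : PySem.Int.mod (k : Int) (2 * ((nn:Int) - 1)) = (m : Int) := by
      rw [hcast]
      unfold PySem.Int.mod
      rw [Int.fmod_eq_emod_of_nonneg _ (by positivity), ← Int.natCast_mod, hmeq]
    simp only [hne, if_false, hmod, hmeq, if_neg (show ¬ nn ≤ 1 by omega)]
    by_cases hm : m < nn
    · rw [if_pos (by exact_mod_cast hm), if_pos hm]
    · rw [if_neg (by exact_mod_cast hm), if_neg hm]
      omega
  · have : nn = 1 := by omega
    subst this; simp

lemma mod_succ (k p : Nat) (hp : 2 ≤ p) :
    (k + 1) % p = if k % p + 1 = p then 0 else k % p + 1 := by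
  have h1 : 1 % p = 1 := Nat.mod_eq_of_lt (by omega)
  have h2 : k % p < p := Nat.mod_lt _ (by omega)
  rw [Nat.add_mod, h1]
  split_ifs with h
  · simp [h]
  · exact Nat.mod_eq_of_lt (by omega)

lemma natTri_zero (nn : Nat) : natTri nn 0 = 0 := by
  unfold natTri
  simp only [Nat.zero_mod]
  split_ifs <;> omega

lemma rflag_zero (nn : Nat) : rflag nn 0 = false := by
  simp [rflag]

lemma aStep_inv (nn k : Nat) (h : 1 ≤ nn) :
    aStep (nn : Int) ((natTri nn k : Nat) : Int) (rflag nn k)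
      = (((natTri nn (k + 1) : Nat) : Int), rflag nn (k + 1)) := by
  rcases Nat.lt_or_ge 1 nn with h2 | h2
  · -- 2 ≤ nn
    have hnn : (1:Int) < (nn:Int) := by exact_mod_cast h2
    set p := 2 * (nn - 1) with hp
    have hp2 : 2 ≤ p := by omega
    obtain ⟨m, hm, hmeq⟩ : ∃ m, m < p ∧ k % p = m := ⟨_, Nat.mod_lt _ (by omega), rfl⟩
    have hsucc : (k + 1) % p = if m + 1 = p then 0 else m + 1 := by
      rw [mod_succ k p hp2, hmeq]
    have hTk : natTri nn k = if m < nn then m else p - m := by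
      simp only [natTri, ← hp, hmeq, if_neg (show ¬ nn ≤ 1 by omega)]
    have hRk1 : rflag nn (k + 1) = decide (nn - 1 ≤ m) := by
      simp only [rflag, Nat.add_sub_cancel, ← hp, hmeq]
      rw [decide_eq_decide]
      exact ⟨fun ⟨_, _, hx⟩ => hx, fun hx => ⟨h2, by omega, hx⟩⟩
    rcases Nat.eq_zero_or_pos k with hk0 | hk1
    · -- k = 0 : state (0, false) steps to (1, false)
      subst hk0
      have hm0 : m = 0 := by simpa using hmeq.symm
      subst hm0
      have hT1 : natTri nn 1 = 1 := by
        simp only [natTri, ← hp, if_neg (show ¬ nn ≤ 1 by omega),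
          Nat.mod_eq_of_lt (show 1 < p by omega)]
        rw [if_pos (by omega)]
      have hR1 : rflag nn (0 + 1) = false := by
        rw [hRk1, decide_eq_false_iff_not]; omega
      rw [natTri_zero, rflag_zero, hT1, hR1]
      simp only [aStep]
      split_ifs <;>
              first
              | (simp only [Prod.mk.injEq]; exact ⟨by omega, rfl⟩)
              | (simp only [Prod.mk.injEq, and_true, true_and]; omega)
              | (exfalso; omega)
              | (exact (And.right ‹_ ∧ False›).elim)
              | (exfalso; exact absurd (And.right ‹_ ∧ (true = false)›) (by simp))
              | (exfalso; apply ‹¬(_ ∧ True)›; exact ⟨hnn, trivial⟩)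
    · -- 1 ≤ k : relate m to the previous index (k-1) % p
      obtain ⟨m', hm', hmeq'⟩ : ∃ m', m' < p ∧ (k - 1) % p = m' :=
        ⟨_, Nat.mod_lt _ (by omega), rfl⟩
      have hrel : m = if m' + 1 = p then 0 else m' + 1 := by
        have := mod_succ (k - 1) p hp2
        rw [show k - 1 + 1 = k by omega, hmeq, hmeq'] at this
        exact this
      have hRk : rflag nn k = decide (nn - 1 ≤ m') := by
        simp only [rflag, ← hp, hmeq']
        rw [decide_eq_decide]
        exact ⟨fun ⟨_, _, hx⟩ => hx, fun hx => ⟨h2, hk1, hx⟩⟩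
      by_cases hz : m = 0
      · -- the counter is at 0 coming down: flag true, next state (1, false)
        have hpm : m' = p - 1 := by
          by_cases hc : m' + 1 = p
          · omega
          · rw [if_neg hc] at hrel; omega
        have hrT : rflag nn k = true := by rw [hRk]; exact decide_eq_true (by omega)
        have hT : natTri nn k = 0 := by rw [hTk, if_pos (by omega)]; omega
        have hs1 : (k + 1) % p = 1 := by rw [hsucc, if_neg (by omega)]; omega
        have hT1 : natTri nn (k + 1) = 1 := by
          simp only [natTri, ← hp, hs1, if_neg (show ¬ nn ≤ 1 by omega)]
          rw [if_pos (by omega)]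
        have hR1 : rflag nn (k + 1) = false := by
          rw [hRk1, decide_eq_false_iff_not]; omega
        rw [hT, hT1, hrT, hR1]
        simp only [aStep]
        split_ifs <;>
              first
              | (simp only [Prod.mk.injEq]; exact ⟨by omega, rfl⟩)
              | (simp only [Prod.mk.injEq, and_true, true_and]; omega)
              | (exfalso; omega)
              | (exact (And.right ‹_ ∧ False›).elim)
              | (exfalso; exact absurd (And.right ‹_ ∧ (true = false)›) (by simp))
              | (exfalso; apply ‹¬(_ ∧ True)›; exact ⟨hnn, trivial⟩)
      · by_cases hfl : nn ≤ m
        · -- reversing phase: counter p - m goes down (wrapping to (0, true) at m = p - 1)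
          have hm'v : m' = m - 1 := by
            by_cases hc : m' + 1 = p
            · rw [if_pos hc] at hrel; omega
            · rw [if_neg hc] at hrel; omega
          have hrT : rflag nn k = true := by rw [hRk]; exact decide_eq_true (by omega)
          have hT : natTri nn k = p - m := by rw [hTk, if_neg (by omega)]
          have hR1 : rflag nn (k + 1) = true := by
            rw [hRk1]; exact decide_eq_true (by omega)
          by_cases hend : m + 1 = p
          · have hs1 : (k + 1) % p = 0 := by rw [hsucc, if_pos hend]
            have hT1 : natTri nn (k + 1) = 0 := by
              simp only [natTri, ← hp, hs1, if_neg (show ¬ nn ≤ 1 by omega)]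
              rw [if_pos (by omega)]
            rw [hT, hT1, hrT, hR1]
            simp only [aStep]
            split_ifs <;>
              first
              | (simp only [Prod.mk.injEq]; exact ⟨by omega, rfl⟩)
              | (simp only [Prod.mk.injEq, and_true, true_and]; omega)
              | (exfalso; omega)
              | (exact (And.right ‹_ ∧ False›).elim)
              | (exfalso; exact absurd (And.right ‹_ ∧ (true = false)›) (by simp))
              | (exfalso; apply ‹¬(_ ∧ True)›; exact ⟨hnn, trivial⟩)
          · have hs1 : (k + 1) % p = m + 1 := by rw [hsucc, if_neg hend]
            have hT1 : natTri nn (k + 1) = p - (m + 1) := by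
              simp only [natTri, ← hp, hs1, if_neg (show ¬ nn ≤ 1 by omega)]
              rw [if_neg (by omega)]
            rw [hT, hT1, hrT, hR1]
            simp only [aStep]
            split_ifs <;>
              first
              | (simp only [Prod.mk.injEq]; exact ⟨by omega, rfl⟩)
              | (simp only [Prod.mk.injEq, and_true, true_and]; omega)
              | (exfalso; omega)
              | (exact (And.right ‹_ ∧ False›).elim)
              | (exfalso; exact absurd (And.right ‹_ ∧ (true = false)›) (by simp))
              | (exfalso; apply ‹¬(_ ∧ True)›; exact ⟨hnn, trivial⟩)
        · -- forward phase: counter m goes up (turning to (nn - 2, true) at m = nn - 1)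
          have hm'v : m' = m - 1 := by
            by_cases hc : m' + 1 = p
            · rw [if_pos hc] at hrel; omega
            · rw [if_neg hc] at hrel; omega
          have hrF : rflag nn k = false := by
            rw [hRk, decide_eq_false_iff_not]; omega
          have hT : natTri nn k = m := by rw [hTk, if_pos (by omega)]
          by_cases hturn : m + 1 = nn
          · have hR1 : rflag nn (k + 1) = true := by
              rw [hRk1]; exact decide_eq_true (by omega)
            have hT1 : natTri nn (k + 1) = nn - 2 := by
              by_cases hq : m + 1 = p
              · have hs1 : (k + 1) % p = 0 := by rw [hsucc, if_pos hq]
                simp only [natTri, ← hp, hs1, if_neg (show ¬ nn ≤ 1 by omega)]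
                rw [if_pos (by omega)]
                omega
              · have hs1 : (k + 1) % p = m + 1 := by rw [hsucc, if_neg hq]
                simp only [natTri, ← hp, hs1, if_neg (show ¬ nn ≤ 1 by omega)]
                rw [if_neg (by omega)]
                omega
            rw [hT, hT1, hrF, hR1]
            simp only [aStep]
            split_ifs <;>
              first
              | (simp only [Prod.mk.injEq]; exact ⟨by omega, rfl⟩)
              | (simp only [Prod.mk.injEq, and_true, true_and]; omega)
              | (exfalso; omega)
              | (exact (And.right ‹_ ∧ False›).elim)
              | (exfalso; exact absurd (And.right ‹_ ∧ (true = false)›) (by simp))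
              | (exfalso; apply ‹¬(_ ∧ True)›; exact ⟨hnn, trivial⟩)
          · have hR1 : rflag nn (k + 1) = false := by
              rw [hRk1, decide_eq_false_iff_not]; omega
            have hs1 : (k + 1) % p = m + 1 := by rw [hsucc, if_neg (by omega)]
            have hT1 : natTri nn (k + 1) = m + 1 := by
              simp only [natTri, ← hp, hs1, if_neg (show ¬ nn ≤ 1 by omega)]
              rw [if_pos (by omega)]
            rw [hT, hT1, hrF, hR1]
            simp only [aStep]
            split_ifs <;>
              first
              | (simp only [Prod.mk.injEq]; exact ⟨by omega, rfl⟩)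
              | (simp only [Prod.mk.injEq, and_true, true_and]; omega)
              | (exfalso; omega)
              | (exact (And.right ‹_ ∧ False›).elim)
              | (exfalso; exact absurd (And.right ‹_ ∧ (true = false)›) (by simp))
              | (exfalso; apply ‹¬(_ ∧ True)›; exact ⟨hnn, trivial⟩)
  · -- nn = 1 : the counter never moves
    have h1 : nn = 1 := by omega
    subst h1
    simp [aStep, natTri, rflag]

-- the loop invariant: after m iterations A's state is B's output so far plus the
-- closed-form counters and flags
lemma fold_inv (string1 string2 : String)
    (h1 : 1 ≤ string1.toList.length) (h2 : 1 ≤ string2.toList.length) (m : Nat) :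
    (List.range m).foldl
        (aBody string1 string2 (PySem.Str.len string1) (PySem.Str.len string2))
        ([], 0, 0, false, false)
      = ((List.range m).foldl
           (bBody string1 string2 (PySem.Str.len string1) (PySem.Str.len string2)) [],
         ((natTri string1.toList.length m : Nat) : Int),
         ((natTri string2.toList.length m : Nat) : Int),
         rflag string1.toList.length m, rflag string2.toList.length m) := by
  induction m with
  | zero =>
      simp only [List.range_zero, List.foldl_nil, natTri_zero, rflag_zero, Nat.cast_zero]
  | succ m ih =>
      rw [List.range_succ, List.foldl_append, List.foldl_append, ih]
      simp only [List.foldl_cons, List.foldl_nil]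
      have hl1 : PySem.Str.len string1 = (string1.toList.length : Int) := by
        simp [PySem.Str.len_eq]
      have hl2 : PySem.Str.len string2 = (string2.toList.length : Int) := by
        simp [PySem.Str.len_eq]
      have hi1 := triIdx_cast string1.toList.length m h1
      have hi2 := triIdx_cast string2.toList.length m h2
      have hs1 := aStep_inv string1.toList.length m h1
      have hs2 := aStep_inv string2.toList.length m h2
      simp only [aBody, bBody, hl1, hl2, hi1, hi2, hs1, hs2]

-- ===== VERDICT (by name: the statement is the Claim_ definition above) =====
theorem loopy_madness_spec : Claim_equal_loopy_madness := by
  intro string1 string2 _ hpre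
  unfold Spec_loopy_madness
  by_cases he : string1.toList = []
  · have he2 : string2.toList = [] := hpre.mp he
    simp [loopy_madness, loopy_madness_alt, PySem.Str.len_eq, he, he2]
  · have he2 : string2.toList ≠ [] := fun h => he (hpre.mpr h)
    have h1 : 1 ≤ string1.toList.length := List.length_pos_iff.mpr he
    have h2 : 1 ≤ string2.toList.length := List.length_pos_iff.mpr he2
    simp only [loopy_madness, loopy_madness_alt]
    rw [fold_inv string1 string2 h1 h2]
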